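-- pv_equiv track=rewrite | github.com/PennyLaneAI/flagsynth | rotoptsynth/rot_opt_qsd.py | filter_by_zeroed_qubit
-- ===== SOURCE A (Python) =====
-- def filter_by_zeroed_qubit(angles, mux_wires, target, zeroed_qubits):
--     for w in zeroed_qubits:
--         if w == target:
--             assert w == len(zeroed_qubits)-1, f"{w=}, {len(zeroed_qubits)-1=}, {zeroed_qubits=}"
--             zeroed_qubits = zeroed_qubits[:-1]
--             break
--         angles = angles[:len(angles)//2]
--         mux_wires = mux_wires[1:]
--     return angles, mux_wires, zeroed_qubits
-- ===== SOURCE B (Python) =====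
-- def filter_by_zeroed_qubit(angles, mux_wires, target, zeroed_qubits):
--     try:
--         k = zeroed_qubits.index(target)
--     except ValueError:
--         k = len(zeroed_qubits)
--     else:
--         assert target == len(zeroed_qubits) - 1, f"{target=}, {len(zeroed_qubits)-1=}, {zeroed_qubits=}"
--         zeroed_qubits = zeroed_qubits[:-1]
--     return angles[: len(angles) // (2 ** k)], mux_wires[k:], zeroed_qubits
-- ===== Notes on version B (the rewrite author's own statement) =====
-- stated objective: faster
-- what changed: Replaces the incremental loop that re-slices angles and mux_wires on every iteration with one index lookup of target and single closed-form slices angles[:len//(2**k)] and mux_wires[k:].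
import Mathlib
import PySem

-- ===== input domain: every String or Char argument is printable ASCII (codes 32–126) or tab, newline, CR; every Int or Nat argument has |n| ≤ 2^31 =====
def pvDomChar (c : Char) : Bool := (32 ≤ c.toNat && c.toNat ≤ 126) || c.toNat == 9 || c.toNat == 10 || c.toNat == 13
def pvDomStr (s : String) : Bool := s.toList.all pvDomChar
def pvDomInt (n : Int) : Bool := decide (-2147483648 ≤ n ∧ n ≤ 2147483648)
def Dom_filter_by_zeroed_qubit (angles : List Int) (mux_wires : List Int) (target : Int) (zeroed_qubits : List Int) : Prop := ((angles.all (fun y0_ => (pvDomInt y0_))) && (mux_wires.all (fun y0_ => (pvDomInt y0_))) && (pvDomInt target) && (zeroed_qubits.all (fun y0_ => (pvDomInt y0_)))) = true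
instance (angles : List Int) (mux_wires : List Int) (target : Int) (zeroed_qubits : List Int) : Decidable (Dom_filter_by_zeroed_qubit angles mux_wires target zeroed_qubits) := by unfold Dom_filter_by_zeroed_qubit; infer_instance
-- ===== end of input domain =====

-- B replaces A's incremental halve-and-drop loop by one first-index lookup plus closed-form slices (simpler decomposition, same cost class).


-- ===== PORT A =====
-- the for-loop: `zq` is the ORIGINAL zeroed_qubits (unchanged until the break),
-- `rest` the elements still to iterate.  angles[:len(angles)//2] = take (length/2)
-- (exact: both bounds nonneg), mux_wires[1:] = drop 1, zeroed_qubits[:-1] = dropLast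
-- (exact, incl. the empty list).  The assert is excluded by Pre_ below.
def fbzLoop (target : Int) (zq : List Int) : List Int → List Int → List Int → List Int × List Int × List Int
  | angles, mux_wires, [] => (angles, mux_wires, zq)
  | angles, mux_wires, w :: ws =>
      if w == target then (angles, mux_wires, zq.dropLast)
      else fbzLoop target zq (angles.take (angles.length / 2)) (mux_wires.drop 1) ws

def filter_by_zeroed_qubit (angles : List Int) (mux_wires : List Int) (target : Int) (zeroed_qubits : List Int) : List Int × List Int × List Int :=
  fbzLoop target zeroed_qubits angles mux_wires zeroed_qubits

-- ===== PORT B =====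
-- zeroed_qubits.index(target) → PySem.List.index?; on success trim the last element,
-- on ValueError k = len(zeroed_qubits).  angles[:len//(2**k)] = take (length/2^k),
-- mux_wires[k:] = drop k (exact: nonneg bounds).
def filter_by_zeroed_qubit_alt (angles : List Int) (mux_wires : List Int) (target : Int) (zeroed_qubits : List Int) : List Int × List Int × List Int :=
  match PySem.List.index? zeroed_qubits target with
  | some k => (angles.take (angles.length / 2 ^ k), mux_wires.drop k, zeroed_qubits.dropLast)
  | none   => (angles.take (angles.length / 2 ^ zeroed_qubits.length), mux_wires.drop zeroed_qubits.length, zeroed_qubits)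

-- ===== PRECONDITION & SPEC =====
-- Pre_ excludes exactly the inputs where A's assert fails (AssertionError):
-- target occurs in zeroed_qubits but is not len(zeroed_qubits)-1.  B raises there too.
def Pre_filter_by_zeroed_qubit (angles : List Int) (mux_wires : List Int) (target : Int) (zeroed_qubits : List Int) : Prop :=
  target ∈ zeroed_qubits → target = (zeroed_qubits.length : Int) - 1
instance (angles : List Int) (mux_wires : List Int) (target : Int) (zeroed_qubits : List Int) : Decidable (Pre_filter_by_zeroed_qubit angles mux_wires target zeroed_qubits) := by unfold Pre_filter_by_zeroed_qubit; infer_instance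

def pvWitness_filter_by_zeroed_qubit : List Int × List Int × Int × List Int := ([1, 2, 3, 4], [5, 6], 1, [3, 1])

def Spec_filter_by_zeroed_qubit (angles : List Int) (mux_wires : List Int) (target : Int) (zeroed_qubits : List Int) (out : List Int × List Int × List Int) : Prop := out = filter_by_zeroed_qubit_alt angles mux_wires target zeroed_qubits
instance (angles : List Int) (mux_wires : List Int) (target : Int) (zeroed_qubits : List Int) (out : List Int × List Int × List Int) : Decidable (Spec_filter_by_zeroed_qubit angles mux_wires target zeroed_qubits out) := by unfold Spec_filter_by_zeroed_qubit; infer_instance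

-- ===== CLAIM (what is proved, stated in full; the proofs are below) =====
def Claim_equal_filter_by_zeroed_qubit : Prop := ∀ (angles : List Int) (mux_wires : List Int) (target : Int) (zeroed_qubits : List Int), Dom_filter_by_zeroed_qubit angles mux_wires target zeroed_qubits → Pre_filter_by_zeroed_qubit angles mux_wires target zeroed_qubits → Spec_filter_by_zeroed_qubit angles mux_wires target zeroed_qubits (filter_by_zeroed_qubit angles mux_wires target zeroed_qubits)

-- ===== LEMMAS AND PROOFS =====

lemma take_half_take_pow (angles : List Int) (k : ℕ) :
    (angles.take (angles.length / 2)).take ((angles.take (angles.length / 2)).length / 2 ^ k)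
      = angles.take (angles.length / 2 ^ (k + 1)) := by
  have hlen : (angles.take (angles.length / 2)).length = angles.length / 2 := by
    simp [List.length_take, Nat.min_eq_left (Nat.div_le_self _ _)]
  rw [List.take_take, hlen]
  congr 1
  have : angles.length / 2 / 2 ^ k = angles.length / 2 ^ (k + 1) := by
    rw [Nat.div_div_eq_div_mul, pow_succ, mul_comm]
  rw [← this]
  exact Nat.min_eq_left (Nat.div_le_self _ _)

lemma fbzLoop_closed (target : Int) (zq : List Int) :
    ∀ (rest angles mux_wires : List Int),
      fbzLoop target zq angles mux_wires rest =
        match PySem.List.index? rest target with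
        | some k => (angles.take (angles.length / 2 ^ k), mux_wires.drop k, zq.dropLast)
        | none   => (angles.take (angles.length / 2 ^ rest.length), mux_wires.drop rest.length, zq) := by
  intro rest
  induction rest with
  | nil => intro angles mux_wires; simp [fbzLoop, PySem.List.index?]
  | cons w ws ih =>
      intro angles mux_wires
      by_cases hw : w = target
      · subst hw
        rw [PySem.List.index?_cons_self]
        simp [fbzLoop]
      · rw [PySem.List.index?_cons_of_ne ws hw]
        have h2 : fbzLoop target zq angles mux_wires (w :: ws)
            = fbzLoop target zq (angles.take (angles.length / 2)) (mux_wires.drop 1) ws := by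
          simp [fbzLoop, hw]
        rw [h2, ih]
        cases PySem.List.index? ws target with
        | none =>
            simp only [Option.map_none]
            rw [take_half_take_pow]
            simp
        | some k =>
            simp only [Option.map_some]
            rw [take_half_take_pow]
            simp

-- ===== VERDICT (by name: the statement is the Claim_ definition above) =====
theorem filter_by_zeroed_qubit_spec : Claim_equal_filter_by_zeroed_qubit := by
  intro angles mux_wires target zeroed_qubits _ _
  unfold Spec_filter_by_zeroed_qubit filter_by_zeroed_qubit filter_by_zeroed_qubit_alt
  rw [fbzLoop_closed]
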